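-- pv_equiv track=rewrite | github.com/KaryneAlencar/python-academy | For/maior_abobora.py | maior_abobora
-- ===== SOURCE A (Python) =====
-- def maior_abobora(especie, lista_aboboras):
--     maior_abobora = 0
--     indice = -1 #inicializa o indice
--     i = 0 # o i vai ser o indice
--     while i < len(lista_aboboras): #pega o indice
--         for abobora in lista_aboboras[i]:
--             if abobora[1] == especie:
--                 if abobora[0] > maior_abobora:
--                     maior_abobora = abobora[0]
--                     indice = i
--         i += 1
--     return indice
-- ===== SOURCE B (Python) =====
-- def maior_abobora(especie, lista_aboboras):
--     # phase 1: best matching weight per row (0 if none positive)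
--     melhores = []
--     for linha in lista_aboboras:
--         melhor = 0
--         for abobora in linha:
--             if abobora[1] == especie and abobora[0] > melhor:
--                 melhor = abobora[0]
--         melhores.append(melhor)
--     # phase 2: earliest row with the strictly largest positive best
--     maior = 0
--     indice = -1
--     for i, melhor in enumerate(melhores):
--         if melhor > maior:
--             maior = melhor
--             indice = i
--     return indice
-- ===== Notes on version B (the rewrite author's own statement) =====
-- stated objective: alternative
-- what changed: Replaced A's single scan with a global running max by two phases: first build a per-row best-weight table, then argmax over that table with earliest-index tie-breaking.
import Mathlib
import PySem

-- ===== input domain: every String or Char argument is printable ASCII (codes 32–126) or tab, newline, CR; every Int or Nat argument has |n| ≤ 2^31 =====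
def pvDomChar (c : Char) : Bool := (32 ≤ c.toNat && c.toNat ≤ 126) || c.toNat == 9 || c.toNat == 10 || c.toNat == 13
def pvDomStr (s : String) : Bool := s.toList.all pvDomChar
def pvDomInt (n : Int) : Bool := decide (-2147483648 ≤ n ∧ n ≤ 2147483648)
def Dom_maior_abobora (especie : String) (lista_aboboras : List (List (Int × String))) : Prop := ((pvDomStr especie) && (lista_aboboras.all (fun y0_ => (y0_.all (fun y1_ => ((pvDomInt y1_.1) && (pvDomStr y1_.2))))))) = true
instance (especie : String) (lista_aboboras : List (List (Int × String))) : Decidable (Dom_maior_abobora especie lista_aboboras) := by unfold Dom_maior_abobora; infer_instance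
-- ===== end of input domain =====

-- B replaces A's single scan with a global running max by two phases (per-row best table, then argmax); alternative decomposition, same cost.

-- ===== PORT A =====
-- A's while loop over indices i, with the inner for updating the global (maior, indice)
def maiorLoopA (especie : String) (rows : List (List (Int × String))) (maior indice i : Int) : Int :=
  match rows with
  | [] => indice
  | r :: rs =>
    let s := r.foldl (fun (st : Int × Int) ab =>
      if ab.2 == especie then (if ab.1 > st.1 then (ab.1, i) else st) else st) (maior, indice)
    maiorLoopA especie rs s.1 s.2 (i + 1)

def maior_abobora (especie : String) (lista_aboboras : List (List (Int × String))) : Int :=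
  maiorLoopA especie lista_aboboras 0 (-1) 0

-- ===== PORT B =====
-- phase 1 inner loop: best matching weight of one row, starting at 0
def rowBest (especie : String) (linha : List (Int × String)) : Int :=
  linha.foldl (fun melhor ab =>
    if ab.2 == especie && decide (ab.1 > melhor) then ab.1 else melhor) 0

def maior_abobora_alt (especie : String) (lista_aboboras : List (List (Int × String))) : Int :=
  let melhores := lista_aboboras.map (rowBest especie)
  ((PySem.List.enumerate melhores).foldl
    (fun (st : Int × Int) p => if p.2 > st.1 then (p.2, p.1) else st) (0, -1)).2

-- ===== PRECONDITION & SPEC =====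
def Spec_maior_abobora (especie : String) (lista_aboboras : List (List (Int × String))) (out : Int) : Prop := out = maior_abobora_alt especie lista_aboboras
instance (especie : String) (lista_aboboras : List (List (Int × String))) (out : Int) : Decidable (Spec_maior_abobora especie lista_aboboras out) := by unfold Spec_maior_abobora; infer_instance

-- ===== CLAIM (what is proved, stated in full; the proofs are below) =====
def Claim_equal_maior_abobora : Prop := ∀ (especie : String) (lista_aboboras : List (List (Int × String))), Dom_maior_abobora especie lista_aboboras → Spec_maior_abobora especie lista_aboboras (maior_abobora especie lista_aboboras)

-- ===== LEMMAS AND PROOFS =====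

-- rowBest's fold started from an arbitrary lower bound b
def gRow (especie : String) (b : Int) (linha : List (Int × String)) : Int :=
  linha.foldl (fun melhor ab =>
    if ab.2 == especie && decide (ab.1 > melhor) then ab.1 else melhor) b

theorem rowBest_eq_gRow (especie : String) (linha : List (Int × String)) :
    rowBest especie linha = gRow especie 0 linha := rfl

theorem gRow_cons (especie : String) (b : Int) (ab : Int × String) (rest : List (Int × String)) :
    gRow especie b (ab :: rest) =
      gRow especie (if ab.2 == especie && decide (ab.1 > b) then ab.1 else b) rest := rfl

theorem le_gRow (especie : String) (linha : List (Int × String)) (b : Int) :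
    b ≤ gRow especie b linha := by
  induction linha generalizing b with
  | nil => simp [gRow]
  | cons ab rest ih =>
    rw [gRow_cons]
    refine le_trans ?_ (ih _)
    split_ifs with h
    · exact le_of_lt (of_decide_eq_true (Bool.and_elim_right h))
    · exact le_refl b

theorem step_nonneg (especie : String) (b : Int) (ab : Int × String) (hb : 0 ≤ b) :
    0 ≤ (if ab.2 == especie && decide (ab.1 > b) then ab.1 else b) := by
  split_ifs with h
  · exact le_trans hb (le_of_lt (of_decide_eq_true (Bool.and_elim_right h)))
  · exact hb

theorem gRow_merge (especie : String) (linha : List (Int × String)) (b : Int) (hb : 0 ≤ b) :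
    gRow especie b linha =
      if rowBest especie linha > b then rowBest especie linha else b := by
  induction linha generalizing b with
  | nil =>
    simp only [gRow, rowBest, List.foldl_nil]
    split_ifs <;> omega
  | cons ab rest ih =>
    have hR : 0 ≤ gRow especie 0 rest := le_gRow especie rest 0
    rw [← rowBest_eq_gRow] at hR
    rw [rowBest_eq_gRow, gRow_cons, gRow_cons,
        ih _ (step_nonneg especie b ab hb), ih _ (step_nonneg especie 0 ab le_rfl)]
    by_cases hp : (ab.2 == especie) = true <;>
      simp only [hp, Bool.true_and, Bool.false_and, decide_eq_true_eq,
        Bool.false_eq_true, if_false] <;>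
      split_ifs <;> omega

-- A's inner for-loop, characterised by rowBest
theorem stepA_eq (especie : String) (linha : List (Int × String)) (m ind i : Int) (hm : 0 ≤ m) :
    linha.foldl (fun (st : Int × Int) ab =>
        if ab.2 == especie then (if ab.1 > st.1 then (ab.1, i) else st) else st) (m, ind)
      = (if rowBest especie linha > m then rowBest especie linha else m,
         if rowBest especie linha > m then i else ind) := by
  induction linha generalizing m ind with
  | nil =>
    simp only [List.foldl_nil]
    have h0 : rowBest especie [] = 0 := rfl
    have hngt : ¬ (0 : Int) > m := by omega
    rw [h0]
    simp [hngt]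
  | cons ab rest ih =>
    have hR : 0 ≤ rowBest especie rest := le_gRow especie rest 0
    have hcons : rowBest especie (ab :: rest) =
        if rowBest especie rest > (if ab.2 == especie && decide (ab.1 > (0:Int)) then ab.1 else 0)
        then rowBest especie rest
        else (if ab.2 == especie && decide (ab.1 > (0:Int)) then ab.1 else 0) := by
      rw [rowBest_eq_gRow, gRow_cons, gRow_merge especie rest _ (step_nonneg especie 0 ab le_rfl)]
    simp only [List.foldl_cons]
    by_cases hp : (ab.2 == especie) = true <;>
      simp only [hp, if_true, Bool.true_and, Bool.false_and, decide_eq_true_eq,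
        Bool.false_eq_true, if_false] at hcons ⊢
    · by_cases h1 : ab.1 > m <;> simp only [h1, if_true, if_false]
      · rw [ih _ _ (le_of_lt (lt_of_le_of_lt hm h1)), hcons]
        have h2 : ab.1 > (0:Int) := lt_of_le_of_lt hm h1
        simp only [h2, if_true, Prod.mk.injEq]
        constructor <;> split_ifs <;> first | rfl | omega
      · rw [ih _ _ hm, hcons]
        by_cases h2 : ab.1 > (0:Int) <;>
          simp only [h2, if_true, if_false, Prod.mk.injEq] <;>
          constructor <;> split_ifs <;> first | rfl | omega
    · rw [ih _ _ hm, hcons]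
      simp only [Prod.mk.injEq]
      constructor <;> split_ifs <;> first | rfl | omega

-- A's outer loop equals B's argmax fold over the enumerated per-row table
theorem loop_eq (especie : String) (rows : List (List (Int × String))) (m ind i : Int) (hm : 0 ≤ m) :
    maiorLoopA especie rows m ind i =
      ((PySem.List.enumerate (rows.map (rowBest especie)) i).foldl
        (fun (st : Int × Int) p => if p.2 > st.1 then (p.2, p.1) else st) (m, ind)).2 := by
  induction rows generalizing m ind i with
  | nil => simp [maiorLoopA, PySem.List.enumerate_nil]
  | cons r rs ih =>
    rw [List.map_cons, PySem.List.enumerate_cons]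
    simp only [maiorLoopA, List.foldl_cons]
    rw [stepA_eq especie r m ind i hm]
    have hR : 0 ≤ rowBest especie r := le_gRow especie r 0
    by_cases h : rowBest especie r > m
    · simp only [h, if_true]
      exact ih _ _ _ (le_of_lt (lt_of_le_of_lt hm h))
    · simp only [h, if_false]
      exact ih _ _ _ hm

-- ===== VERDICT (by name: the statement is the Claim_ definition above) =====
theorem maior_abobora_spec : Claim_equal_maior_abobora := by
  intro especie lista _
  show maior_abobora especie lista = maior_abobora_alt especie lista
  rw [maior_abobora, maior_abobora_alt]
  exact loop_eq especie lista 0 (-1) 0 le_rfl
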